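-- pv_equiv track=rewrite | github.com/sean00002/QBiC-SELEX | sequence_utils.py | find_largest_k
-- ===== SOURCE A (Python) =====
-- def sliding_window(x, k):
--     """Create a sliding window of DNA sequences.
--     Args:
--         x (str): A DNA sequence.
--         k (int): The window size.
--     Returns:
--         list: A list of k-mer sequences.
--     """
--     return [x[i:i+k] for i in range(len(x)-(k-1))]
--
-- def reverse_complement(sequence):
--     """Function to get the reverse complement of a DNA sequence"""
--     complement = {'A': 'T', 'C': 'G', 'G': 'C', 'T': 'A'}
--     return "".join(complement[base] for base in reversed(sequence))
--
-- def find_largest_k(sequences, rc = True):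
--     """
--     Find the largest k-mer size for a list of sequences.
--     Args:
--         sequences (list): A list of DNA sequences.
--         rc (bool): If True, include reverse complements. Default is True.
--     Returns:
--         int: The largest k-mer size.
--     """
--     if rc == True:
--         for k in range(1,len(sequences[0]) + 1):
--             kmer = set([x for sub in [sliding_window(x, k) for x in sequences] for x in sub])
--             kmer_rc = set([reverse_complement(x) for x in kmer])
--             kmer_set = kmer.union(kmer_rc)
--             if len(kmer_set) < 4 ** k:
--                 return k - 1
--     else:
--         for k in range(1,len(sequences[0]) + 1):
--             kmer = set([x for sub in [sliding_window(x, k) for x in sequences] for x in sub])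
--             if len(kmer) < 4 ** k:
--                 return k - 1
-- ===== SOURCE B (Python) =====
-- # B: position-partition refinement. No k-mer strings and no per-k string sets:
-- # positions carry an integer label identifying their current k-prefix class;
-- # each level extends every still-valid position by ONE character, numbering the
-- # distinct (label, next char) pairs, and compares the class count to 4**k.
-- _COMP = {'A': 'T', 'C': 'G', 'G': 'C', 'T': 'A'}
--
-- def find_largest_k(sequences, rc=True):
--     seqs = list(sequences)
--     if rc:
--         seqs.extend(''.join(_COMP[c] for c in reversed(s)) for s in sequences)
--     # live window-start positions, each with a class label for its current prefix
--     live = [(s, i, 0) for s in seqs for i in range(len(s))]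
--     for k in range(1, len(sequences[0]) + 1):
--         ids = {}
--         nxt = []
--         for (s, i, lab) in live:
--             if i + k <= len(s):
--                 key = (lab, s[i + k - 1])
--                 if key not in ids:
--                     ids[key] = len(ids)
--                 nxt.append((s, i, ids[key]))
--         if len(ids) < 4 ** k:
--             return k - 1
--         live = nxt
-- ===== Notes on version B (the rewrite author's own statement) =====
-- stated objective: alternative
-- what changed: Per k, A rebuilds every k-mer as a string slice, collects them in a set, maps a reverse-complement set over it and unions before comparing the cardinality to 4**k; B never builds k-mer strings or string sets: it reverse-complements the whole sequences once up front, keeps window START POSITIONS tagged with an integer label for their current prefix class, and at each level extends every still-valid position by a single character, numbering the distinct (label, next char) pairs with a first-occurrence dict, whose size is the distinct k-mer count (partition refinement). …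
-- outside the precondition, e.g. on find_largest_k(['', 'a'], True): A returns None, B raises KeyError; on find_largest_k(['A', 'C', 'G', 'T'], False): A returns None, B returns None
import Mathlib
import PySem

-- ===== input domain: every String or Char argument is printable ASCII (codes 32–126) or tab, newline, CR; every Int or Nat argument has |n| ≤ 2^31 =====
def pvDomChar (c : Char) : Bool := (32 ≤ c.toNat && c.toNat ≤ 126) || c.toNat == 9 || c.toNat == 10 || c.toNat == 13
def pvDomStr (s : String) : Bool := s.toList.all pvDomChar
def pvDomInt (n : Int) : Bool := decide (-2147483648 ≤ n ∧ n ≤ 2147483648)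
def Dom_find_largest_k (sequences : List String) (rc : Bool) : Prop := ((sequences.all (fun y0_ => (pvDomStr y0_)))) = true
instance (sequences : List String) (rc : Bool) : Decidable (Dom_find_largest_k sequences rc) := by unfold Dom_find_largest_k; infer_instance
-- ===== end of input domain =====

-- B replaces A's per-k string pipeline (build every k-mer slice, set it, map a reverse-complement
-- set over it, union, compare the cardinality to 4^k) by position-partition refinement: window
-- start positions carry an integer label for their current prefix class, each level extends every
-- still-valid position by one character and numbers the distinct (label, char) pairs; an
-- alternative algorithm of similar cost, no k-mer strings or string sets are ever built.

-- ===== PORT A =====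
def pvA_sliding_window (x : List Char) (k : Int) : List (List Char) :=
  (PySem.List.pyRange 0 (PySem.List.len x - (k - 1)) 1).map
    (fun i => PySem.List.slice x (some i) (some (i + k)))

-- complement[base]; Python raises KeyError off A/C/G/T — Pre_ excludes those inputs when rc is set,
-- so the default branch is never reached on admitted inputs
def pvA_complement (c : Char) : Char :=
  if c = 'A' then 'T' else if c = 'C' then 'G' else if c = 'G' then 'C' else if c = 'T' then 'A' else c

def pvA_reverse_complement (s : List Char) : List Char :=
  s.reverse.map pvA_complement

-- the rc = True for-loop of A; [] = loop exhausted = Python returns None: sentinel -1, outside Pre_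
def pvA_loop_rc (seqs : List (List Char)) : List Int → Int
  | [] => -1
  | k :: ks =>
    let kmer : PySem.Set (List Char) :=
      PySem.Set.ofList ((seqs.map (fun x => pvA_sliding_window x k)).flatten)
    let kmer_rc : PySem.Set (List Char) := PySem.Set.ofList (kmer.map pvA_reverse_complement)
    let kmer_set := PySem.Set.union kmer kmer_rc
    -- 4 ** k: k ≥ 1 on every iteration of A's range, so the Nat exponent is exact
    if PySem.List.len kmer_set < (4 : Int) ^ k.toNat then k - 1 else pvA_loop_rc seqs ks

-- the rc = False for-loop of A
def pvA_loop_norc (seqs : List (List Char)) : List Int → Int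
  | [] => -1
  | k :: ks =>
    let kmer : PySem.Set (List Char) :=
      PySem.Set.ofList ((seqs.map (fun x => pvA_sliding_window x k)).flatten)
    if PySem.List.len kmer < (4 : Int) ^ k.toNat then k - 1 else pvA_loop_norc seqs ks

def find_largest_k (sequences : List String) (rc : Bool) : Int :=
  let seqs := sequences.map String.toList
  -- sequences[0]: IndexError on []; Pre_ excludes the empty list
  let s0 := (PySem.List.pyGet? seqs 0).getD []
  if rc = true then pvA_loop_rc seqs (PySem.List.pyRange 1 (PySem.List.len s0 + 1) 1)
  else pvA_loop_norc seqs (PySem.List.pyRange 1 (PySem.List.len s0 + 1) 1)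

-- ===== PORT B =====
-- ''.join(_COMP[c] for c in reversed(s)) applied once to a WHOLE sequence (same _COMP table as A;
-- the total default branch is never reached on admitted inputs)
def pvB_rcseq (s : List Char) : List Char := s.reverse.map pvA_complement

-- seqs = list(sequences) extended, under rc, by the reverse-complemented sequences
def pvB_seqs (seqs : List (List Char)) (rc : Bool) : List (List Char) :=
  seqs ++ (if rc then seqs.map pvB_rcseq else [])

-- live = [(s, i, 0) for s in seqs for i in range(len(s))]
def pvB_init (seqs : List (List Char)) : List (List Char × Nat × Nat) :=
  seqs.flatMap (fun s => (List.range s.length).map (fun i => (s, i, 0)))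

-- body of the level-k scan: skip dead positions, number the distinct (label, next char) keys
-- by first occurrence, append the position with its new label; s[i+k-1] is in range since
-- i + k ≤ len(s) and 1 ≤ k, so getD is exact
def pvB_step (k : Nat)
    (st : PySem.Dict (Nat × Char) Nat × List (List Char × Nat × Nat))
    (e : List Char × Nat × Nat) :
    PySem.Dict (Nat × Char) Nat × List (List Char × Nat × Nat) :=
  if e.2.1 + k ≤ e.1.length then
    let key : Nat × Char := (e.2.2, e.1.getD (e.2.1 + k - 1) ' ')
    let ids := if st.1.contains key then st.1 else st.1.insert key st.1.size
    (ids, st.2 ++ [(e.1, e.2.1, ids.getD key 0)])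
  else st

-- for k in range(1, len(sequences[0]) + 1): …; falling off = Python returns None: sentinel -1,
-- outside Pre_
def pvB_loop (n k : Nat) (live : List (List Char × Nat × Nat)) : Int :=
  if k ≤ n then
    let r := live.foldl (pvB_step k) (PySem.Dict.empty, [])
    if r.1.size < 4 ^ k then (k : Int) - 1 else pvB_loop n (k + 1) r.2
  else -1
termination_by n + 1 - k
decreasing_by omega

def find_largest_k_alt (sequences : List String) (rc : Bool) : Int :=
  match sequences with
  | [] => -1                    -- len(sequences[0]) raises in Source B too; outside Pre_
  | s0 :: _ =>
    pvB_loop s0.toList.length 1 (pvB_init (pvB_seqs (sequences.map String.toList) rc))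

-- ===== PRECONDITION & SPEC =====
def pvACGT (c : Char) : Bool := c = 'A' || c = 'C' || c = 'G' || c = 'T'

-- the window s[i:i+k]
def pvWin (s : List Char) (i k : Nat) : List Char := (s.drop i).take k

-- all length-k windows of a list of sequences
def pvWins (seqs : List (List Char)) (k : Nat) : List (List Char) :=
  seqs.flatMap (fun s => (List.range (s.length + 1 - k)).map (fun i => pvWin s i k))

-- number of distinct k-mers of the input (including reverse complements when rc)
def pvCount (sequences : List String) (rc : Bool) (k : Nat) : Nat :=
  (PySem.List.dedup (pvWins (pvB_seqs (sequences.map String.toList) rc) k)).length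

-- Pre_ excludes exactly the inputs on which A does not return an int: the empty sequence list
-- (IndexError), a non-ACGT character together with rc (KeyError in reverse_complement), and the
-- inputs whose k-mer sets are complete at every k in [1, len(sequences[0])], where A falls off the
-- loop and returns None.
def Pre_find_largest_k (sequences : List String) (rc : Bool) : Prop :=
  sequences ≠ [] ∧
  (rc = true → sequences.all (fun s => s.toList.all pvACGT) = true) ∧
  (List.range (sequences.headD "").toList.length).any
    (fun j => pvCount sequences rc (j + 1) < 4 ^ (j + 1)) = true
instance (sequences : List String) (rc : Bool) : Decidable (Pre_find_largest_k sequences rc) := by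
  unfold Pre_find_largest_k; infer_instance

def pvWitness_find_largest_k : List String × Bool := (["ACG", "TT"], true)

def Spec_find_largest_k (sequences : List String) (rc : Bool) (out : Int) : Prop := out = find_largest_k_alt sequences rc
instance (sequences : List String) (rc : Bool) (out : Int) : Decidable (Spec_find_largest_k sequences rc out) := by unfold Spec_find_largest_k; infer_instance

-- ===== CLAIM (what is proved, stated in full; the proofs are below) =====
def Claim_equal_find_largest_k : Prop := ∀ (sequences : List String) (rc : Bool), Dom_find_largest_k sequences rc → Pre_find_largest_k sequences rc → Spec_find_largest_k sequences rc (find_largest_k sequences rc)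

-- ===== LEMMAS AND PROOFS =====

-- entry/partition vocabulary for the proofs
def pvValid (k : Nat) (e : List Char × Nat × Nat) : Bool := decide (e.2.1 + k ≤ e.1.length)
def pvKeyOf (k : Nat) (e : List Char × Nat × Nat) : Nat × Char := (e.2.2, e.1.getD (e.2.1 + k - 1) ' ')
def pvDAdd (d : PySem.Dict (Nat × Char) Nat) (key : Nat × Char) : PySem.Dict (Nat × Char) Nat :=
  if d.contains key then d else d.insert key d.size
def pvPos (e : List Char × Nat × Nat) : List Char × Nat := (e.1, e.2.1)
def pvPosList (seqs : List (List Char)) : List (List Char × Nat) :=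
  seqs.flatMap (fun s => (List.range s.length).map (fun i => (s, i)))

-- the level invariant: live holds exactly the positions alive entering level k, and labels
-- coincide exactly on equal (k-1)-windows
def pvJ (seqs : List (List Char)) (k : Nat) (live : List (List Char × Nat × Nat)) : Prop :=
  live.map pvPos = (pvPosList seqs).filter (fun p => decide (p.2 + (k - 1) ≤ p.1.length)) ∧
  ∀ e₁ ∈ live, ∀ e₂ ∈ live,
    (e₁.2.2 = e₂.2.2 ↔ pvWin e₁.1 e₁.2.1 (k - 1) = pvWin e₂.1 e₂.2.1 (k - 1))

theorem pv_card_congr {α β γ : Type} [DecidableEq β] [DecidableEq γ]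
    (l : List α) (f : α → β) (g : α → γ)
    (h : ∀ a ∈ l, ∀ b ∈ l, (f a = f b ↔ g a = g b)) :
    (l.map f).toFinset.card = (l.map g).toFinset.card := by
  induction l with
  | nil => simp
  | cons a t ih =>
    have ht : ∀ x ∈ t, ∀ y ∈ t, (f x = f y ↔ g x = g y) := by
      intro x hx y hy; exact h x (List.mem_cons_of_mem _ hx) y (List.mem_cons_of_mem _ hy)
    have hmem : f a ∈ (t.map f).toFinset ↔ g a ∈ (t.map g).toFinset := by
      simp only [List.mem_toFinset, List.mem_map]
      constructor
      · rintro ⟨b, hb, hfb⟩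
        exact ⟨b, hb, ((h a List.mem_cons_self b (List.mem_cons_of_mem _ hb)).mp hfb.symm).symm⟩
      · rintro ⟨b, hb, hgb⟩
        exact ⟨b, hb, ((h a List.mem_cons_self b (List.mem_cons_of_mem _ hb)).mpr hgb.symm).symm⟩
    simp only [List.map_cons, List.toFinset_cons]
    by_cases hf : f a ∈ (t.map f).toFinset
    · rw [Finset.insert_eq_self.mpr hf, Finset.insert_eq_self.mpr (hmem.mp hf), ih ht]
    · rw [Finset.card_insert_of_notMem hf,
        Finset.card_insert_of_notMem (fun hg => hf (hmem.mpr hg)), ih ht]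

-- window facts
theorem pv_win_ext (s : List Char) (i k : Nat) (hk : 1 ≤ k) (h : i + k ≤ s.length) :
    pvWin s i k = pvWin s i (k - 1) ++ [s.getD (i + k - 1) ' '] := by
  unfold pvWin
  have h1 : k - 1 + 1 = k := by omega
  rw [← h1, List.take_add_one]
  congr 1
  have hidx : i + (k - 1) = i + k - 1 := by omega
  rw [List.getElem?_drop, hidx, List.getElem?_eq_getElem (show i + k - 1 < s.length by omega)]
  simp [List.getD]
  rw [hidx, List.getElem?_eq_getElem (show i + k - 1 < s.length by omega)]
  simp

theorem pv_win_eq_iff (s₁ s₂ : List Char) (i₁ i₂ k : Nat) (hk : 1 ≤ k)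
    (h₁ : i₁ + k ≤ s₁.length) (h₂ : i₂ + k ≤ s₂.length) :
    pvWin s₁ i₁ k = pvWin s₂ i₂ k ↔
      (pvWin s₁ i₁ (k - 1) = pvWin s₂ i₂ (k - 1) ∧
        s₁.getD (i₁ + k - 1) ' ' = s₂.getD (i₂ + k - 1) ' ') := by
  rw [pv_win_ext s₁ i₁ k hk h₁, pv_win_ext s₂ i₂ k hk h₂]
  constructor
  · intro he
    have := List.append_inj' he (by simp)
    simp at this
    exact this
  · rintro ⟨h1, h2⟩; rw [h1, h2]

theorem pv_rc_win (s : List Char) (i k : Nat) (h : i + k ≤ s.length) :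
    pvA_reverse_complement (pvWin s i k) = pvWin (pvB_rcseq s) (s.length - i - k) k := by
  unfold pvA_reverse_complement pvB_rcseq pvWin
  rw [List.reverse_take, List.length_drop, List.reverse_drop, List.drop_take,
    show s.length - i - (s.length - i - k) = k by omega,
    ← List.map_drop, ← List.map_take]

theorem pv_mem_pvWins (seqs : List (List Char)) (k : Nat) (x : List Char) :
    x ∈ pvWins seqs k ↔ ∃ s ∈ seqs, ∃ i, i + k ≤ s.length ∧ x = pvWin s i k := by
  unfold pvWins
  simp only [List.mem_flatMap, List.mem_map, List.mem_range]
  constructor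
  · rintro ⟨s, hs, i, hi, rfl⟩
    exact ⟨s, hs, i, by omega, rfl⟩
  · rintro ⟨s, hs, i, hi, rfl⟩
    exact ⟨s, hs, i, by omega, rfl⟩

-- dict-numbering facts
def pvDInv (d : PySem.Dict (Nat × Char) Nat) : Prop :=
  d.keys.Nodup ∧ d.values.Nodup ∧ ∀ v ∈ d.values, v < d.size

theorem pv_dAdd_keys (d : PySem.Dict (Nat × Char) Nat) (key : Nat × Char) :
    (pvDAdd d key).keys = PySem.Set.add d.keys key := by
  unfold pvDAdd
  by_cases h : d.contains key = true
  · have hmem : key ∈ d.keys := (PySem.Dict.contains_iff_mem_keys d key).mp h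
    rw [if_pos h]
    simp only [PySem.Set.add]
    rw [if_pos (by simpa [PySem.Set.contains] using hmem)]
  · have h' : d.contains key = false := by simpa using h
    have hmem : key ∉ d.keys := fun hm => h ((PySem.Dict.contains_iff_mem_keys d key).mpr hm)
    rw [if_neg h]
    rw [PySem.Dict.keys_insert_of_not_contains d _ h']
    simp only [PySem.Set.add]
    rw [if_neg (by simpa [PySem.Set.contains] using hmem)]

theorem pv_dfold_keys (kl : List (Nat × Char)) :
    ∀ (d : PySem.Dict (Nat × Char) Nat),
    (kl.foldl pvDAdd d).keys = PySem.Set.update d.keys kl := by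
  induction kl with
  | nil => intro d; simp [PySem.Set.update]
  | cons a t ih =>
    intro d
    simp only [List.foldl_cons]
    rw [ih, pv_dAdd_keys]
    simp [PySem.Set.update]

theorem pv_dfold_get_stable (kl : List (Nat × Char)) :
    ∀ (d : PySem.Dict (Nat × Char) Nat) (key : Nat × Char), d.contains key = true →
    (kl.foldl pvDAdd d).get? key = d.get? key := by
  induction kl with
  | nil => intro d key _; rfl
  | cons a t ih =>
    intro d key h
    simp only [List.foldl_cons]
    have hc : (pvDAdd d a).contains key = true := by
      unfold pvDAdd; split
      · exact h
      · rw [PySem.Dict.contains_insert]; simp [h]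
    rw [ih _ _ hc]
    unfold pvDAdd; split
    · rfl
    · rename_i hna
      have hne : key ≠ a := by rintro rfl; simp [h] at hna
      rw [PySem.Dict.get?_insert_of_ne d _ hne]

theorem pv_dAdd_dInv (d : PySem.Dict (Nat × Char) Nat) (key : Nat × Char) (h : pvDInv d) :
    pvDInv (pvDAdd d key) := by
  obtain ⟨hk, hv, hb⟩ := h
  unfold pvDAdd; split
  · exact ⟨hk, hv, hb⟩
  · rename_i hna
    have hitems := PySem.Dict.items_insert_of_not_contains d (k := key) d.size (by simpa using hna)
    constructor
    · rw [PySem.Dict.keys_insert_of_not_contains d (k := key) _ (by simpa using hna)]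
      have hcf : ¬ d.contains key = true := by simpa using hna
      have hnk : key ∉ d.keys := fun hm => hcf ((PySem.Dict.contains_iff_mem_keys d key).mpr hm)
      simp [List.nodup_append, hk]
      intro a b hab heq
      exact hnk (heq ▸ hab)
    constructor
    · show ((d.insert key d.size).items.map (fun x => x.2)).Nodup
      rw [hitems]
      simp only [List.map_append, List.map_cons, List.map_nil, List.nodup_append,
        List.nodup_cons]
      refine ⟨hv, by simp, ?_⟩
      intro x hx
      simp only [List.mem_singleton, forall_eq]
      intro hx2
      exact absurd (hb _ hx) (by rw [hx2]; simp [PySem.Dict.size])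
    · intro v hv2
      show v < (d.insert key d.size).size
      have hcf : ¬ d.contains key = true := by simpa using hna
      rw [PySem.Dict.size_insert, if_neg hcf]
      have : v ∈ (d.insert key d.size).items.map (fun x => x.2) := hv2
      rw [hitems] at this
      simp only [List.map_append, List.mem_append, List.map_cons, List.map_nil,
        List.mem_singleton] at this
      rcases this with h1 | h1
      · have := hb v h1; omega
      · subst h1; simp [PySem.Dict.size]

theorem pv_dInv_fold (kl : List (Nat × Char)) :
    ∀ (d : PySem.Dict (Nat × Char) Nat), pvDInv d → pvDInv (kl.foldl pvDAdd d) := by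
  induction kl with
  | nil => intro d h; exact h
  | cons a t ih => intro d h; exact ih _ (pv_dAdd_dInv d a h)

theorem pv_dInv_getD_inj (d : PySem.Dict (Nat × Char) Nat) (h : pvDInv d)
    (k₁ k₂ : Nat × Char) (h₁ : k₁ ∈ d.keys) (h₂ : k₂ ∈ d.keys)
    (he : d.getD k₁ 0 = d.getD k₂ 0) : k₁ = k₂ := by
  obtain ⟨hk, hv, _⟩ := h
  have hvals := PySem.Dict.values_eq_map_keys d hk 0
  have : (d.keys.map (fun k => d.getD k 0)).Nodup := by rw [← hvals]; exact hv
  exact List.inj_on_of_nodup_map this h₁ h₂ he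

theorem pv_dfold_size (kl : List (Nat × Char)) :
    (kl.foldl pvDAdd PySem.Dict.empty).size = kl.toFinset.card := by
  have hkeys := pv_dfold_keys kl PySem.Dict.empty
  have hsz : (kl.foldl pvDAdd PySem.Dict.empty).size =
      (kl.foldl pvDAdd PySem.Dict.empty).keys.length := by
    simp [PySem.Dict.size, PySem.Dict.keys]
  rw [hsz, hkeys]
  have : PySem.Set.update (PySem.Dict.empty : PySem.Dict (Nat × Char) Nat).keys kl =
      PySem.Set.ofList kl := by
    simp [PySem.Set.update, PySem.Set.ofList, PySem.Dict.keys_empty]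
  rw [this, ← PySem.List.dedup_eq_ofList]
  have hnd := PySem.List.nodup_dedup kl
  have hm : (PySem.List.dedup kl).toFinset = kl.toFinset := by ext x; simp
  rw [← hm, List.toFinset_card_of_nodup hnd]

theorem pv_dfold_mem_keys (kl : List (Nat × Char)) (key : Nat × Char) (h : key ∈ kl) :
    key ∈ (kl.foldl pvDAdd PySem.Dict.empty).keys := by
  rw [pv_dfold_keys]
  have : PySem.Set.update (PySem.Dict.empty : PySem.Dict (Nat × Char) Nat).keys kl =
      PySem.Set.ofList kl := by
    simp [PySem.Set.update, PySem.Set.ofList, PySem.Dict.keys_empty]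
  rw [this]
  exact (PySem.Set.mem_ofList kl key).mpr h

-- the level fold decomposed
theorem pv_step_valid (k : Nat) (st : PySem.Dict (Nat × Char) Nat × List (List Char × Nat × Nat))
    (e : List Char × Nat × Nat) (h : pvValid k e = true) :
    pvB_step k st e = (pvDAdd st.1 (pvKeyOf k e),
      st.2 ++ [(e.1, e.2.1, (pvDAdd st.1 (pvKeyOf k e)).getD (pvKeyOf k e) 0)]) := by
  simp only [pvValid, decide_eq_true_eq] at h
  simp [pvB_step, pvDAdd, pvKeyOf, h]

theorem pv_step_invalid (k : Nat) (st : PySem.Dict (Nat × Char) Nat × List (List Char × Nat × Nat))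
    (e : List Char × Nat × Nat) (h : pvValid k e = false) :
    pvB_step k st e = st := by
  simp only [pvValid, decide_eq_false_iff_not] at h
  simp [pvB_step, h]

theorem pv_fold_fst (k : Nat) (live : List (List Char × Nat × Nat)) :
    ∀ (d : PySem.Dict (Nat × Char) Nat) (nxt : List (List Char × Nat × Nat)),
    (live.foldl (pvB_step k) (d, nxt)).1 =
      ((live.filter (pvValid k)).map (pvKeyOf k)).foldl pvDAdd d := by
  induction live with
  | nil => intro d nxt; rfl
  | cons e t ih =>
    intro d nxt
    rcases hv : pvValid k e with hf | ht
    · rw [List.foldl_cons, pv_step_invalid k _ e hv,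
        show (e :: t).filter (pvValid k) = t.filter (pvValid k) by simp [hv]]
      exact ih d nxt
    · rw [List.foldl_cons, pv_step_valid k _ e hv,
        show (e :: t).filter (pvValid k) = e :: t.filter (pvValid k) by simp [hv],
        List.map_cons, List.foldl_cons]
      exact ih _ _

theorem pv_fold_snd (k : Nat) (live : List (List Char × Nat × Nat)) :
    ∀ (d : PySem.Dict (Nat × Char) Nat) (nxt : List (List Char × Nat × Nat)),
    (live.foldl (pvB_step k) (d, nxt)).2 =
      nxt ++ (live.filter (pvValid k)).map
        (fun e => (e.1, e.2.1, ((live.foldl (pvB_step k) (d, nxt)).1).getD (pvKeyOf k e) 0)) := by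
  induction live with
  | nil => intro d nxt; simp
  | cons e t ih =>
    intro d nxt
    rcases hv : pvValid k e with hf | ht
    · rw [List.foldl_cons, pv_step_invalid k _ e hv,
        show (e :: t).filter (pvValid k) = t.filter (pvValid k) by simp [hv]]
      exact ih d nxt
    · have hcons : List.foldl (pvB_step k) (d, nxt) (e :: t)
          = List.foldl (pvB_step k) (pvDAdd d (pvKeyOf k e),
              nxt ++ [(e.1, e.2.1, (pvDAdd d (pvKeyOf k e)).getD (pvKeyOf k e) 0)]) t := by
        rw [List.foldl_cons, pv_step_valid k _ e hv]
      have hkey : (pvDAdd d (pvKeyOf k e)).contains (pvKeyOf k e) = true := by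
        unfold pvDAdd; split
        · assumption
        · rw [PySem.Dict.contains_insert]; simp
      have hstable' :
          (((t.filter (pvValid k)).map (pvKeyOf k)).foldl pvDAdd
              (pvDAdd d (pvKeyOf k e))).getD (pvKeyOf k e) 0 =
            (pvDAdd d (pvKeyOf k e)).getD (pvKeyOf k e) 0 := by
        rw [PySem.Dict.getD_eq_get?_getD, PySem.Dict.getD_eq_get?_getD,
          pv_dfold_get_stable _ _ _ hkey]
      rw [hcons, ih _ _,
        show (e :: t).filter (pvValid k) = e :: t.filter (pvValid k) by simp [hv],
        List.map_cons]
      rw [pv_fold_fst k t, hstable']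
      simp

-- map/filter plumbing
theorem pv_map_pos_filter (k : Nat) (live : List (List Char × Nat × Nat)) :
    (live.filter (pvValid k)).map pvPos =
      (live.map pvPos).filter (fun p => decide (p.2 + k ≤ p.1.length)) := by
  induction live with
  | nil => rfl
  | cons e t ih =>
    simp only [List.filter_cons, List.map_cons]
    rcases hv : pvValid k e with hf | ht
    · rw [if_neg (by simp), if_neg ?_]
      · exact ih
      · simp only [pvValid, decide_eq_false_iff_not] at hv
        simp [pvPos, hv]
    · rw [if_pos rfl, if_pos ?_]
      · simp [ih]
      · simp only [pvValid, decide_eq_true_eq] at hv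
        simp [pvPos, hv]

theorem pv_mem_posList (seqs : List (List Char)) (p : List Char × Nat) :
    p ∈ pvPosList seqs ↔ p.1 ∈ seqs ∧ p.2 < p.1.length := by
  unfold pvPosList
  simp only [List.mem_flatMap, List.mem_map, List.mem_range]
  constructor
  · rintro ⟨s, hs, i, hi, rfl⟩; exact ⟨hs, hi⟩
  · rintro ⟨hs, hi⟩; exact ⟨p.1, hs, p.2, hi, rfl⟩

theorem pv_J_init (seqs : List (List Char)) : pvJ seqs 1 (pvB_init seqs) := by
  constructor
  · have hmap : (pvB_init seqs).map pvPos = pvPosList seqs := by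
      unfold pvB_init pvPosList
      rw [List.map_flatMap]
      have hfun : (fun a => List.map pvPos (List.map (fun i => (a, i, 0)) (List.range a.length)))
          = (fun s : List Char => List.map (fun i => (s, i)) (List.range s.length)) := by
        funext a; rw [List.map_map]; rfl
      rw [hfun]
    rw [hmap]
    rw [List.filter_eq_self.mpr]
    intro p hp
    have := (pv_mem_posList seqs p).mp hp
    simp only [decide_eq_true_eq]
    omega
  · intro e₁ h₁ e₂ h₂
    have z : ∀ e ∈ pvB_init seqs, e.2.2 = 0 := by
      intro e he
      unfold pvB_init at he
      simp only [List.mem_flatMap, List.mem_map, List.mem_range] at he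
      obtain ⟨s, _, i, _, rfl⟩ := he
      rfl
    simp [z e₁ h₁, z e₂ h₂, pvWin]

-- the level theorem
theorem pv_dInv_empty : pvDInv PySem.Dict.empty := by
  refine ⟨?_, ?_, ?_⟩ <;> simp [PySem.Dict.empty, PySem.Dict.keys, PySem.Dict.values,
    PySem.Dict.size]

theorem pv_level (seqs : List (List Char)) (k : Nat) (live : List (List Char × Nat × Nat))
    (hk : 1 ≤ k) (hJ : pvJ seqs k live) :
    (live.foldl (pvB_step k) (PySem.Dict.empty, [])).1.size = (pvWins seqs k).toFinset.card ∧
    pvJ seqs (k + 1) (live.foldl (pvB_step k) (PySem.Dict.empty, [])).2 := by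
  obtain ⟨hJ1, hJ2⟩ := hJ
  have hvalid : ∀ e ∈ live.filter (pvValid k), e.2.1 + k ≤ e.1.length := by
    intro e he
    have := List.of_mem_filter he
    simpa [pvValid] using this
  have hmemlive : ∀ e ∈ live.filter (pvValid k), e ∈ live :=
    fun e he => List.mem_of_mem_filter he
  have hkw : ∀ e₁ ∈ live.filter (pvValid k), ∀ e₂ ∈ live.filter (pvValid k),
      (pvKeyOf k e₁ = pvKeyOf k e₂ ↔ pvWin e₁.1 e₁.2.1 k = pvWin e₂.1 e₂.2.1 k) := by
    intro e₁ h₁ e₂ h₂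
    rw [pv_win_eq_iff _ _ _ _ k hk (hvalid _ h₁) (hvalid _ h₂)]
    unfold pvKeyOf
    rw [Prod.ext_iff]
    simp only
    constructor
    · rintro ⟨hl, hc⟩
      exact ⟨(hJ2 _ (hmemlive _ h₁) _ (hmemlive _ h₂)).mp hl, hc⟩
    · rintro ⟨hw, hc⟩
      exact ⟨(hJ2 _ (hmemlive _ h₁) _ (hmemlive _ h₂)).mpr hw, hc⟩
  have hfst := pv_fold_fst k live PySem.Dict.empty []
  have hsize : (live.foldl (pvB_step k) (PySem.Dict.empty, [])).1.size
      = ((live.filter (pvValid k)).map (pvKeyOf k)).toFinset.card := by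
    rw [hfst]; exact pv_dfold_size _
  have hcardw : ((live.filter (pvValid k)).map (pvKeyOf k)).toFinset.card
      = ((live.filter (pvValid k)).map (fun e => pvWin e.1 e.2.1 k)).toFinset.card :=
    pv_card_congr _ _ _ hkw
  have hwinset : ((live.filter (pvValid k)).map (fun e => pvWin e.1 e.2.1 k)).toFinset
      = (pvWins seqs k).toFinset := by
    ext x
    simp only [List.mem_toFinset]
    have hfactor : (live.filter (pvValid k)).map (fun e => pvWin e.1 e.2.1 k)
        = ((live.filter (pvValid k)).map pvPos).map (fun p => pvWin p.1 p.2 k) := by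
      rw [List.map_map]; rfl
    rw [hfactor, pv_map_pos_filter, hJ1, pv_mem_pvWins]
    simp only [List.mem_map, List.mem_filter, decide_eq_true_eq]
    constructor
    · rintro ⟨p, ⟨⟨hp, h1⟩, h2⟩, rfl⟩
      have := (pv_mem_posList seqs p).mp hp
      exact ⟨p.1, this.1, p.2, h2, rfl⟩
    · rintro ⟨s, hs, i, hi, rfl⟩
      exact ⟨(s, i), ⟨⟨(pv_mem_posList seqs (s, i)).mpr ⟨hs, by show i < s.length; omega⟩,
        by show i + (k - 1) ≤ s.length; omega⟩, hi⟩, rfl⟩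
  refine ⟨by rw [hsize, hcardw, hwinset], ?_⟩
  have hsnd := pv_fold_snd k live PySem.Dict.empty []
  have hInv : pvDInv (live.foldl (pvB_step k) (PySem.Dict.empty, [])).1 := by
    rw [hfst]; exact pv_dInv_fold _ PySem.Dict.empty pv_dInv_empty
  constructor
  · rw [hsnd]
    simp only [List.nil_append]
    have hmapmap : ((live.filter (pvValid k)).map
          (fun e => (e.1, e.2.1,
            ((live.foldl (pvB_step k) (PySem.Dict.empty, [])).1).getD (pvKeyOf k e) 0))).map pvPos
        = (live.filter (pvValid k)).map pvPos := by rw [List.map_map]; rfl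
    rw [hmapmap, pv_map_pos_filter, hJ1, List.filter_filter]
    apply List.filter_congr
    intro p hp
    simp only [← Bool.decide_and, decide_eq_decide]
    omega
  · intro e₁ h₁ e₂ h₂
    rw [hsnd] at h₁ h₂
    simp only [List.nil_append, List.mem_map] at h₁ h₂
    obtain ⟨a₁, ha₁, rfl⟩ := h₁
    obtain ⟨a₂, ha₂, rfl⟩ := h₂
    have hki : ∀ a ∈ live.filter (pvValid k),
        pvKeyOf k a ∈ (live.foldl (pvB_step k) (PySem.Dict.empty, [])).1.keys := by
      intro a ha
      rw [hfst]
      exact pv_dfold_mem_keys _ _ (List.mem_map_of_mem ha)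
    simp only
    constructor
    · intro he
      have hkeq := pv_dInv_getD_inj _ hInv _ _ (hki a₁ ha₁) (hki a₂ ha₂) he
      have := (hkw a₁ ha₁ a₂ ha₂).mp hkeq
      simpa using this
    · intro hw
      have := (hkw a₁ ha₁ a₂ ha₂).mpr (by simpa using hw)
      rw [this]

-- A's per-iteration k-mer set
def pvKA (seqs : List (List Char)) (k : Int) : PySem.Set (List Char) :=
  PySem.Set.ofList ((seqs.map (fun x => pvA_sliding_window x k)).flatten)

theorem pv_mem_sliding_window (x : List Char) (k : Nat) (y : List Char) :
    y ∈ pvA_sliding_window x (k : Int) ↔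
      ∃ i ∈ List.range (x.length + 1 - k), y = pvWin x i k := by
  unfold pvA_sliding_window pvWin
  simp only [List.mem_map, PySem.List.mem_pyRange_one, PySem.List.len_eq, List.mem_range]
  constructor
  · rintro ⟨i, ⟨h0, hi⟩, rfl⟩
    refine ⟨i.toNat, by omega, ?_⟩
    rw [show (i : Int) = ((i.toNat : Nat) : Int) by omega]
    rw [show ((i.toNat : Nat) : Int) + (k : Int) = ((i.toNat : Nat) : Int) + ((k : Nat) : Int)
      by norm_num]
    rw [PySem.List.slice_natCast_add]
    simp only [Int.toNat_natCast]
  · rintro ⟨i, hi, rfl⟩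
    refine ⟨(i : Int), ⟨by omega, by omega⟩, ?_⟩
    rw [show ((i : Nat) : Int) + (k : Int) = ((i : Nat) : Int) + ((k : Nat) : Int) by norm_num]
    rw [PySem.List.slice_natCast_add]

theorem pv_mem_KA (seqs : List (List Char)) (k : Nat) (y : List Char) :
    y ∈ pvKA seqs (k : Int) ↔ ∃ s ∈ seqs, ∃ i, i + k ≤ s.length ∧ y = pvWin s i k := by
  unfold pvKA
  rw [PySem.Set.mem_ofList]
  simp only [List.mem_flatten, List.mem_map]
  constructor
  · rintro ⟨l, ⟨s, hs, rfl⟩, hy⟩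
    obtain ⟨i, hi, rfl⟩ := (pv_mem_sliding_window s k y).mp hy
    simp only [List.mem_range] at hi
    exact ⟨s, hs, i, by omega, rfl⟩
  · rintro ⟨s, hs, i, hi, rfl⟩
    exact ⟨pvA_sliding_window s (k : Int), ⟨s, hs, rfl⟩,
      (pv_mem_sliding_window s k _).mpr ⟨i, by simp only [List.mem_range]; omega, rfl⟩⟩

theorem pv_length_rcseq (s : List Char) : (pvB_rcseq s).length = s.length := by
  simp [pvB_rcseq]

-- windows of the reverse-complemented sequences are the reverse complements of windows
theorem pv_mem_rc_wins (seqs : List (List Char)) (k : Nat) (x : List Char) :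
    (∃ s ∈ seqs.map pvB_rcseq, ∃ i, i + k ≤ s.length ∧ x = pvWin s i k) ↔
      (∃ w ∈ pvKA seqs (k : Int), x = pvA_reverse_complement w) := by
  constructor
  · rintro ⟨s', hs', j, hj, rfl⟩
    simp only [List.mem_map] at hs'
    obtain ⟨s, hs, rfl⟩ := hs'
    rw [pv_length_rcseq] at hj
    refine ⟨pvWin s (s.length - j - k) k, (pv_mem_KA seqs k _).mpr ⟨s, hs, s.length - j - k,
      by omega, rfl⟩, ?_⟩
    rw [pv_rc_win s _ k (by omega)]
    congr 1
    omega
  · rintro ⟨w, hw, rfl⟩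
    obtain ⟨s, hs, i, hi, rfl⟩ := (pv_mem_KA seqs k _).mp hw
    refine ⟨pvB_rcseq s, List.mem_map_of_mem hs, s.length - i - k, by rw [pv_length_rcseq]; omega, ?_⟩
    rw [pv_rc_win s i k hi]

theorem pv_lenA_rc (seqs : List (List Char)) (k : Nat) :
    PySem.List.len (PySem.Set.union (pvKA seqs (k : Int))
        (PySem.Set.ofList ((pvKA seqs (k : Int)).map pvA_reverse_complement))) =
      ((pvWins (pvB_seqs seqs true) k).toFinset.card : Int) := by
  have hnd : (PySem.Set.union (pvKA seqs (k : Int))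
      (PySem.Set.ofList ((pvKA seqs (k : Int)).map pvA_reverse_complement))).Nodup :=
    PySem.Set.nodup_union _ _ (by unfold pvKA; exact PySem.Set.nodup_ofList _)
  have hset : (PySem.Set.union (pvKA seqs (k : Int))
      (PySem.Set.ofList ((pvKA seqs (k : Int)).map pvA_reverse_complement))).toFinset =
      (pvWins (pvB_seqs seqs true) k).toFinset := by
    ext x
    simp only [List.mem_toFinset]
    have hx1 : x ∈ (pvKA seqs (k : Int)).map pvA_reverse_complement ↔
        ∃ w ∈ pvKA seqs (k : Int), x = pvA_reverse_complement w := by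
      rw [List.mem_map]
      constructor
      · rintro ⟨w, hw, rfl⟩; exact ⟨w, hw, rfl⟩
      · rintro ⟨w, hw, rfl⟩; exact ⟨w, hw, rfl⟩
    rw [PySem.Set.mem_union, PySem.Set.mem_ofList, hx1, pv_mem_pvWins]
    have hsplit : ∀ s, s ∈ pvB_seqs seqs true ↔ s ∈ seqs ∨ s ∈ seqs.map pvB_rcseq := by
      intro s; simp [pvB_seqs]
    constructor
    · rintro (h | ⟨w, hw, rfl⟩)
      · obtain ⟨s, hs, i, hi, rfl⟩ := (pv_mem_KA seqs k _).mp h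
        exact ⟨s, (hsplit s).mpr (Or.inl hs), i, hi, rfl⟩
      · obtain ⟨s', hs', j, hj, hx⟩ := (pv_mem_rc_wins seqs k _).mpr ⟨w, hw, rfl⟩
        exact ⟨s', (hsplit s').mpr (Or.inr hs'), j, hj, hx⟩
    · rintro ⟨s, hs, i, hi, rfl⟩
      rcases (hsplit s).mp hs with h | h
      · exact Or.inl ((pv_mem_KA seqs k _).mpr ⟨s, h, i, hi, rfl⟩)
      · obtain ⟨w, hw, hx⟩ := (pv_mem_rc_wins seqs k _).mp ⟨s, h, i, hi, rfl⟩
        exact Or.inr ⟨w, hw, hx⟩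
  rw [PySem.List.len_eq, ← List.toFinset_card_of_nodup hnd, hset]

theorem pv_lenA_norc (seqs : List (List Char)) (k : Nat) :
    PySem.List.len (pvKA seqs (k : Int)) =
      ((pvWins (pvB_seqs seqs false) k).toFinset.card : Int) := by
  have hnd : (pvKA seqs (k : Int)).Nodup := by unfold pvKA; exact PySem.Set.nodup_ofList _
  have hbs : pvB_seqs seqs false = seqs := by simp [pvB_seqs]
  have hset : (pvKA seqs (k : Int)).toFinset = (pvWins (pvB_seqs seqs false) k).toFinset := by
    ext x
    simp only [List.mem_toFinset]
    rw [pv_mem_pvWins, hbs]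
    exact pv_mem_KA seqs k x
  rw [PySem.List.len_eq, ← List.toFinset_card_of_nodup hnd, hset]

-- the two loops agree
theorem pv_loop_eq (seqs : List (List Char)) (rc : Bool) (n : Nat) :
    ∀ (cnt a : Nat), a + cnt = n + 1 → 1 ≤ a →
      ∀ live, pvJ (pvB_seqs seqs rc) a live →
      (if rc then pvA_loop_rc seqs (PySem.List.pyRange (a : Int) ((n : Int) + 1) 1)
       else pvA_loop_norc seqs (PySem.List.pyRange (a : Int) ((n : Int) + 1) 1)) =
        pvB_loop n a live := by
  intro cnt
  induction cnt with
  | zero =>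
    intro a ha ha1 live hJ
    rw [PySem.List.pyRange_one_eq_nil (by omega), pvB_loop]
    cases rc <;> simp [pvA_loop_rc, pvA_loop_norc, show ¬ (a ≤ n) by omega]
  | succ m ih =>
    intro a ha ha1 live hJ
    rw [PySem.List.pyRange_one_cons (by omega), pvB_loop, if_pos (show a ≤ n by omega)]
    have hlevel := pv_level (pvB_seqs seqs rc) a live ha1 hJ
    have hcast : ((4 : Int) ^ ((a : Int)).toNat) = ((4 ^ a : Nat) : Int) := by
      simp [Int.toNat_natCast]
    cases rc with
    | true =>
      show pvA_loop_rc seqs ((a : Int) :: PySem.List.pyRange ((a : Int) + 1) ((n : Int) + 1) 1) = _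
      rw [show pvA_loop_rc seqs ((a : Int) :: PySem.List.pyRange ((a : Int) + 1) ((n : Int) + 1) 1) =
          (if PySem.List.len (PySem.Set.union (pvKA seqs (a : Int))
              (PySem.Set.ofList ((pvKA seqs (a : Int)).map pvA_reverse_complement)))
              < (4 : Int) ^ ((a : Int)).toNat
           then (a : Int) - 1
           else pvA_loop_rc seqs (PySem.List.pyRange ((a : Int) + 1) ((n : Int) + 1) 1)) from rfl]
      rw [pv_lenA_rc seqs a, hcast]
      have hcond : (((pvWins (pvB_seqs seqs true) a).toFinset.card : Int) < ((4 ^ a : Nat) : Int)) ↔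
          ((live.foldl (pvB_step a) (PySem.Dict.empty, [])).1.size < 4 ^ a) := by
        rw [hlevel.1]; exact_mod_cast Iff.rfl
      by_cases hc : (live.foldl (pvB_step a) (PySem.Dict.empty, [])).1.size < 4 ^ a
      · rw [if_pos (hcond.mpr hc), if_pos hc]
      · rw [if_neg (fun h => hc (hcond.mp h)), if_neg hc]
        rw [show ((a : Int) + 1) = ((a + 1 : Nat) : Int) by push_cast; ring]
        have := ih (a + 1) (by omega) (by omega) _ hlevel.2
        simpa using this
    | false =>
      show pvA_loop_norc seqs ((a : Int) :: PySem.List.pyRange ((a : Int) + 1) ((n : Int) + 1) 1) = _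
      rw [show pvA_loop_norc seqs ((a : Int) :: PySem.List.pyRange ((a : Int) + 1) ((n : Int) + 1) 1) =
          (if PySem.List.len (pvKA seqs (a : Int)) < (4 : Int) ^ ((a : Int)).toNat
           then (a : Int) - 1
           else pvA_loop_norc seqs (PySem.List.pyRange ((a : Int) + 1) ((n : Int) + 1) 1)) from rfl]
      rw [pv_lenA_norc seqs a, hcast]
      have hcond : (((pvWins (pvB_seqs seqs false) a).toFinset.card : Int) < ((4 ^ a : Nat) : Int)) ↔
          ((live.foldl (pvB_step a) (PySem.Dict.empty, [])).1.size < 4 ^ a) := by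
        rw [hlevel.1]; exact_mod_cast Iff.rfl
      by_cases hc : (live.foldl (pvB_step a) (PySem.Dict.empty, [])).1.size < 4 ^ a
      · rw [if_pos (hcond.mpr hc), if_pos hc]
      · rw [if_neg (fun h => hc (hcond.mp h)), if_neg hc]
        rw [show ((a : Int) + 1) = ((a + 1 : Nat) : Int) by push_cast; ring]
        have := ih (a + 1) (by omega) (by omega) _ hlevel.2
        simpa using this

theorem pv_main (sequences : List String) (rc : Bool) :
    find_largest_k sequences rc = find_largest_k_alt sequences rc := by
  cases sequences with
  | nil =>
    cases rc <;> simp [find_largest_k, find_largest_k_alt, PySem.List.pyGet?,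
      PySem.List.pyIdx?, PySem.List.len, PySem.List.pyRange_one_eq_nil, pvA_loop_rc, pvA_loop_norc]
  | cons s0 rest =>
    have hinit := pv_J_init (pvB_seqs ((s0 :: rest).map String.toList) rc)
    have hloop := pv_loop_eq ((s0 :: rest).map String.toList) rc s0.toList.length
      s0.toList.length 1 (by omega) (by omega) _ hinit
    have hget : (PySem.List.pyGet? ((s0 :: rest).map String.toList) 0).getD [] = s0.toList := by
      simp
    cases rc with
    | true =>
      show pvA_loop_rc _ _ = _
      rw [show find_largest_k_alt (s0 :: rest) true =
          pvB_loop s0.toList.length 1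
            (pvB_init (pvB_seqs ((s0 :: rest).map String.toList) true)) from rfl]
      rw [← hloop]
      simp [PySem.List.len_eq]
    | false =>
      rw [show find_largest_k_alt (s0 :: rest) false =
          pvB_loop s0.toList.length 1
            (pvB_init (pvB_seqs ((s0 :: rest).map String.toList) false)) from rfl]
      rw [← hloop]
      simp [find_largest_k, PySem.List.len_eq]

-- ===== VERDICT (by name: the statement is the Claim_ definition above) =====
theorem find_largest_k_spec : Claim_equal_find_largest_k := by
  intro sequences rc _ _
  show find_largest_k sequences rc = find_largest_k_alt sequences rc
  exact pv_main sequences rc
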